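-- pv_equiv track=rewrite | github.com/mariano22/clean-corpus | clean_corpus/dedup.py | generate_3grams_sentences_groups
-- ===== SOURCE A (Python) =====
-- def generate_3grams_sentences_groups(sts):
--     n = len(sts)
--     n_padding = ( 3 - n%3 ) % 3
--     for _ in range(n_padding):
--         sts.append('<PAD>')
--     grouped_sentences = []
--     for i in range(0,n,3):
--         grouped_sentences.append(sts[i:i+3])
--     for _ in range(n_padding):
--         sts.pop()
--     return grouped_sentences
-- ===== SOURCE B (Python) =====
-- def generate_3grams_sentences_groups(sts):
--     result = []
--     chunk = []
--     for s in sts: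
--         chunk = chunk + [s]
--         if len(chunk) == 3:
--             result.append(chunk)
--             chunk = []
--     if chunk:
--         result.append(chunk + ['<PAD>'] * (3 - len(chunk)))
--     return result
-- ===== Notes on version B (the rewrite author's own statement) =====
-- stated objective: simpler
-- what changed: Single accumulator pass that collects a running chunk and pads only the final partial chunk, instead of temporarily appending pads to the argument, slicing by index ranges, then popping the pads back off; B also does not mutate sts.
import Mathlib
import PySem

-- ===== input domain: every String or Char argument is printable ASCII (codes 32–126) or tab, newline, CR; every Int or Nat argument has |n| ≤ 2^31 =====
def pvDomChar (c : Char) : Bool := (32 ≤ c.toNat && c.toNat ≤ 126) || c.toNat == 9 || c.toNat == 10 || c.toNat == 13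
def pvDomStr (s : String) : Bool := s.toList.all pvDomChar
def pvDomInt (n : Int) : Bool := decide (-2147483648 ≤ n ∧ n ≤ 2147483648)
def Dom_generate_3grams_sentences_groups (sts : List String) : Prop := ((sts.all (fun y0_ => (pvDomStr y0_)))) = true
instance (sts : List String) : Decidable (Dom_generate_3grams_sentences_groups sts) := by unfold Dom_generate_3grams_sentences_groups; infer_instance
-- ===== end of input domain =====

-- B replaces A's pad-the-argument-then-slice-by-index-then-pop scheme with a single accumulator
-- pass (running chunk, pad only the final partial chunk); objective: simpler, and B does not
-- mutate sts. A mutates sts in place but restores it before returning; the equivalence proved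
-- here is about the return value.

-- ===== PORT A =====
def generate_3grams_sentences_groups (sts : List String) : List (List String) :=
  let n : Int := sts.length
  let n_padding : Int := PySem.Int.mod (3 - PySem.Int.mod n 3) 3
  -- for _ in range(n_padding): sts.append('<PAD>')
  let sts' := (PySem.List.pyRange 0 n_padding 1).foldl (fun acc _ => acc ++ ["<PAD>"]) sts
  -- for i in range(0, n, 3): grouped_sentences.append(sts[i:i+3])
  (PySem.List.pyRange 0 n 3).foldl
    (fun acc i => acc ++ [PySem.List.slice sts' (some i) (some (i + 3))]) []
  -- the final pop loop only restores sts and does not affect the return value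

-- ===== PORT B =====
def pvBStep (p : List (List String) × List String) (s : String) :
    List (List String) × List String :=
  let chunk := p.2 ++ [s]
  if chunk.length = 3 then (p.1 ++ [chunk], []) else (p.1, chunk)

def generate_3grams_sentences_groups_alt (sts : List String) : List (List String) :=
  let p := sts.foldl pvBStep ([], [])
  if p.2 = [] then p.1
  else p.1 ++ [p.2 ++ List.replicate (3 - p.2.length) "<PAD>"]

-- ===== PRECONDITION & SPEC =====
def Spec_generate_3grams_sentences_groups (sts : List String) (out : List (List String)) : Prop := out = generate_3grams_sentences_groups_alt sts
instance (sts : List String) (out : List (List String)) : Decidable (Spec_generate_3grams_sentences_groups sts out) := by unfold Spec_generate_3grams_sentences_groups; infer_instance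

-- ===== CLAIM (what is proved, stated in full; the proofs are below) =====
def Claim_equal_generate_3grams_sentences_groups : Prop := ∀ (sts : List String), Dom_generate_3grams_sentences_groups sts → Spec_generate_3grams_sentences_groups sts (generate_3grams_sentences_groups sts)

-- ===== LEMMAS AND PROOFS =====

-- appending one '<PAD>' per range element is appending replicate-many pads
theorem rep_comm (n : Nat) :
    "<PAD>" :: List.replicate n "<PAD>" = List.replicate n "<PAD>" ++ ["<PAD>"] := by
  rw [← List.replicate_succ, List.replicate_succ']

theorem pad_foldl (l : List Int) (s : List String) :
    l.foldl (fun acc _ => acc ++ ["<PAD>"]) s = s ++ List.replicate l.length "<PAD>" := by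
  induction l generalizing s with
  | nil => simp
  | cons x xs ih =>
    rw [List.foldl_cons, ih, List.length_cons, List.replicate_succ, rep_comm,
        ← List.append_assoc, List.append_assoc s, List.singleton_append, rep_comm,
        ← List.append_assoc]

-- range(0, n, 3) for 0 < n starts with 0
theorem pyRange3_cons (n : Int) (h : 0 < n) :
    PySem.List.pyRange 0 n 3 = 0 :: PySem.List.pyRange 3 n 3 := by
  rw [PySem.List.pyRange_of_pos 0 n (by norm_num), PySem.List.pyRange_of_pos 3 n (by norm_num)]
  by_cases h3 : 3 < n
  · have hc : ((n - 0 + 3 - 1) / 3).toNat = ((n - 3 + 3 - 1) / 3).toNat + 1 := by omega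
    rw [if_pos h, if_pos h3, hc, List.range_succ_eq_map]
    simp [List.map_map, Function.comp]
    intro k _
    ring
  · have hn : ((n - 0 + 3 - 1) / 3).toNat = 1 := by omega
    rw [if_pos h, if_neg h3, hn]
    simp

-- range(3, m+3, 3) is range(0, m, 3) shifted by 3
theorem pyRange3_shift (m : Int) :
    PySem.List.pyRange 3 (m + 3) 3 = (PySem.List.pyRange 0 m 3).map (· + 3) := by
  rw [PySem.List.pyRange_of_pos 3 (m + 3) (by norm_num),
      PySem.List.pyRange_of_pos 0 m (by norm_num), List.map_map]
  have hif : (if 3 < m + 3 then ((m + 3 - 3 + 3 - 1) / 3).toNat else 0)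
      = (if 0 < m then ((m - 0 + 3 - 1) / 3).toNat else 0) := by
    by_cases h : 0 < m
    · rw [if_pos (by omega), if_pos h]; congr 1; omega
    · rw [if_neg (by omega), if_neg h]
  rw [hif]
  apply List.map_congr_left
  intro k _
  simp [Function.comp]
  ring

theorem drop_add3 (m : Nat) (x1 x2 x3 : String) (xs : List String) :
    (x1 :: x2 :: x3 :: xs).drop (m + 3) = xs.drop m := by
  rw [show m + 3 = (m + 2) + 1 by omega, List.drop_succ_cons,
      show m + 2 = (m + 1) + 1 by omega, List.drop_succ_cons, List.drop_succ_cons]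

-- a slice [i+3 : i+6] of x1::x2::x3::xs is the slice [i : i+3] of xs
theorem slice_shift3 (xs : List String) (x1 x2 x3 : String) (i : Int) (hi : 0 ≤ i) :
    PySem.List.slice (x1 :: x2 :: x3 :: xs) (some (i + 3)) (some (i + 3 + 3))
      = PySem.List.slice xs (some i) (some (i + 3)) := by
  rw [PySem.List.slice_toNat _ (by omega) (by omega), PySem.List.slice_toNat _ hi (by omega)]
  have h1 : (i + 3).toNat = i.toNat + 3 := by omega
  have h2 : (i + 3 + 3).toNat = i.toNat + 6 := by omega
  rw [h1, h2, drop_add3]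
  congr 1
  omega

-- B's fold only appends to the result component
theorem bfold_prefix (l : List String) (r : List (List String)) (c : List String) :
    l.foldl pvBStep (r, c)
      = (r ++ (l.foldl pvBStep ([], c)).1, (l.foldl pvBStep ([], c)).2) := by
  induction l generalizing r c with
  | nil => simp
  | cons s l ih =>
    simp only [List.foldl]
    by_cases h : (c ++ [s]).length = 3
    · rw [show pvBStep (r, c) s = (r ++ [c ++ [s]], []) by simp [pvBStep, h],
          show pvBStep ([], c) s = ([c ++ [s]], []) by simp [pvBStep, h],
          ih (r ++ [c ++ [s]]) [], ih [c ++ [s]] []]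
      simp
    · have h' : ¬ c.length = 2 := by simpa using h
      rw [show pvBStep (r, c) s = (r, c ++ [s]) by simp [pvBStep, h'],
          show pvBStep ([], c) s = ([], c ++ [s]) by simp [pvBStep, h']]
      exact ih r (c ++ [s])

-- B peels exactly one full group off three leading elements
theorem B_cons3 (a b c : String) (rest : List String) :
    generate_3grams_sentences_groups_alt (a :: b :: c :: rest)
      = [a, b, c] :: generate_3grams_sentences_groups_alt rest := by
  unfold generate_3grams_sentences_groups_alt
  have h3 : (([] : List String) ++ [a] ++ [b] ++ [c]).length = 3 := by simp
  simp only [List.foldl]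
  rw [show pvBStep (pvBStep (pvBStep ([], []) a) b) c = ([[a, b, c]], []) by
        simp [pvBStep]]
  rw [bfold_prefix rest [[a, b, c]] []]
  by_cases h : (rest.foldl pvBStep ([], [])).2 = []
  · simp [h]
  · simp [h]

-- A peels exactly one full group off three leading elements
theorem A_cons3 (a b c : String) (rest : List String) :
    generate_3grams_sentences_groups (a :: b :: c :: rest)
      = [a, b, c] :: generate_3grams_sentences_groups rest := by
  unfold generate_3grams_sentences_groups
  simp only
  have hm : (((a :: b :: c :: rest).length : Int)) = (rest.length : Int) + 3 := by
    push_cast [List.length_cons]; ring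
  have hnp : PySem.Int.mod (3 - PySem.Int.mod ((a :: b :: c :: rest).length : Int) 3) 3
      = PySem.Int.mod (3 - PySem.Int.mod ((rest.length : Int)) 3) 3 := by
    rw [PySem.Int.mod_eq_emod_of_pos (by norm_num),
        PySem.Int.mod_eq_emod_of_pos (by norm_num),
        PySem.Int.mod_eq_emod_of_pos (by norm_num),
        PySem.Int.mod_eq_emod_of_pos (by norm_num), hm]
    omega
  rw [hnp, hm]
  rw [pad_foldl, pad_foldl]
  set pads := List.replicate (PySem.List.pyRange 0
      (PySem.Int.mod (3 - PySem.Int.mod ((rest.length : Int)) 3) 3) 1).length "<PAD>" with hpads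
  have hcons : (a :: b :: c :: rest) ++ pads = a :: b :: c :: (rest ++ pads) := by simp
  rw [hcons]
  rw [pyRange3_cons _ (by positivity), pyRange3_shift]
  simp only [List.foldl_cons, List.foldl_map]
  have hslice0 : PySem.List.slice (a :: b :: c :: (rest ++ pads)) (some 0) (some (0 + 3))
      = [a, b, c] := by
    rw [PySem.List.slice_toNat _ (by norm_num) (by norm_num)]
    simp
  rw [hslice0]
  rw [PySem.List.foldl_congr_mem _ _
        (fun acc i => acc ++ [PySem.List.slice (rest ++ pads) (some i) (some (i + 3))]) _
        (by
          intro acc x hx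
          have hx0 : 0 ≤ x := ((PySem.List.mem_pyRange_iff_of_pos (by norm_num) x).1 hx).1
          rw [slice_shift3 _ _ _ _ _ hx0])]
  rw [PySem.List.foldl_append_eq_flatMap
        (fun i => [PySem.List.slice (rest ++ pads) (some i) (some (i + 3))]),
      PySem.List.foldl_append_eq_flatMap
        (fun i => [PySem.List.slice (rest ++ pads) (some i) (some (i + 3))])]
  simp

theorem A_eq_B : ∀ (sts : List String),
    generate_3grams_sentences_groups sts = generate_3grams_sentences_groups_alt sts
  | [] => by decide
  | [a] => by
    unfold generate_3grams_sentences_groups generate_3grams_sentences_groups_alt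
    simp only [List.length_cons, List.length_nil, Nat.reduceAdd, Nat.cast_one]
    rw [show PySem.Int.mod (3 - PySem.Int.mod (1 : Int) 3) 3 = 2 by decide,
        show PySem.List.pyRange 0 2 1 = [0, 1] by decide,
        show PySem.List.pyRange 0 (1 : Int) 3 = [0] by decide]
    simp [List.foldl, pvBStep, PySem.List.slice, PySem.List.clampIdx, List.replicate]
  | [a, b] => by
    unfold generate_3grams_sentences_groups generate_3grams_sentences_groups_alt
    simp only [List.length_cons, List.length_nil, Nat.reduceAdd, Nat.cast_ofNat]
    rw [show PySem.Int.mod (3 - PySem.Int.mod (2 : Int) 3) 3 = 1 by decide,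
        show PySem.List.pyRange 0 1 1 = [0] by decide,
        show PySem.List.pyRange 0 (2 : Int) 3 = [0] by decide]
    simp [List.foldl, pvBStep, PySem.List.slice, PySem.List.clampIdx]
  | a :: b :: c :: rest => by
    rw [A_cons3, B_cons3, A_eq_B rest]

-- ===== VERDICT (by name: the statement is the Claim_ definition above) =====
theorem generate_3grams_sentences_groups_spec : Claim_equal_generate_3grams_sentences_groups := by
  intro sts _
  unfold Spec_generate_3grams_sentences_groups
  exact A_eq_B sts
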